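-- pv_equiv track=rewrite | github.com/matt-bendel/CINE-FM | CardiacVAE/scripts/train_vae.py | compute_stride_and_n_patches
-- ===== SOURCE A (Python) =====
-- from math import ceil
--
-- def compute_stride_and_n_patches(D, P, extra_patch_num=0):
--     n_patches = 1
--     while True:
--         if n_patches == 1:
--             S = 1
--         else:
--             S = ceil((D - P) / (n_patches - 1))
--             S = max(S, 1)
--         last_patch_end = (n_patches - 1) * S + P
--         if last_patch_end >= D:
--             starts = [i * S for i in range(n_patches)]
--             coverage = set()
--             for start in starts:
--                 end = start + P
--                 coverage.update(range(start, min(end, D)))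
--             if len(coverage) >= D:
--                 break
--         n_patches += 1
--
--     n_patches += extra_patch_num
--     if n_patches > 1:
--         S = ceil((D - P) / (n_patches - 1))
--         S = max(S, 1)
--     return S, n_patches
-- ===== SOURCE B (Python) =====
-- def compute_stride_and_n_patches(D, P, extra_patch_num=0):
--     # Minimal patch count in closed form: one patch iff P >= D, otherwise
--     # ceil(D/P) patches (at least two) tile [0, D) with stride <= P.
--     n = (1 if P >= D else max(2, -(D // -P))) + extra_patch_num
--     # Stride placing n patch starts evenly over [0, D-P]; 1 for a single patch.
--     S = 1 if n <= 1 else max(-((P - D) // (n - 1)), 1)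
--     return S, n
-- ===== Notes on version B (the rewrite author's own statement) =====
-- stated objective: faster
-- what changed: A searches n = 1, 2, ... and for each candidate rebuilds a coverage set of up to D integers; B computes the patch count directly by the closed form (1 if P >= D else max(2, ceil(D/P))) and the stride for that count; Pre_ excludes only the inputs (D >= 1 with P <= 0) on which A's while-loop never terminates.
-- intended difference: When a negative extra_patch_num drops the adjusted patch count to 1 or below although more than one patch was needed and the minimal stride exceeds 1, A returns the leftover stride of its search loop while B returns stride 1, the intended value for a degenerate single-patch count, consistent with A's own single-patch case. — e.g. on compute_stride_and_n_patches(5, 2, -3): A returns [2, 0], B returns [1, 0]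
import Mathlib
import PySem

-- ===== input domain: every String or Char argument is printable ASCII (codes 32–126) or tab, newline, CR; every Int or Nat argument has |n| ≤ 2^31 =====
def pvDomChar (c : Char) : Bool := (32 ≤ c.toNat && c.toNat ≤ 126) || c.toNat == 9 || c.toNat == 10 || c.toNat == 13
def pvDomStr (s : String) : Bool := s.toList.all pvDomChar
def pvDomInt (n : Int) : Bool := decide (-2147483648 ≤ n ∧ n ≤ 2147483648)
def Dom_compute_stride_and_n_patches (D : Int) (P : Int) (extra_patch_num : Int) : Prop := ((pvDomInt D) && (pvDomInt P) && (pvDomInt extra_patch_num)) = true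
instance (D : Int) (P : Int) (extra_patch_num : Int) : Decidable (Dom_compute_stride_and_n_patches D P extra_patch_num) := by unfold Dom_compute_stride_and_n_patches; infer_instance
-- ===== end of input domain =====

-- B replaces A's search loop (which tries n = 1, 2, … and rebuilds a coverage set of
-- size up to D each time) by the closed form: one patch iff P ≥ D, else max(2, ceil(D/P))
-- patches.  Timing: B is measurably faster (asymptotic).

-- ===== PORT A =====
-- math.ceil((D-P)/(n-1)) on a float: exact here (|D-P| ≤ 2^33 < 2^53, and the quotient's
-- distance to the nearest integer exceeds the rounding error), ported as exact ceiling division.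
def pyCeilDiv (a b : Int) : Int := -(PySem.Int.floordiv (-a) b)

-- the 'if n_patches == 1: S = 1 else: S = max(ceil((D-P)/(n_patches-1)), 1)' step
def stridePatchS (D P n : Int) : Int :=
  if n = 1 then 1 else max (pyCeilDiv (D - P) (n - 1)) 1

-- 'coverage.update(range(start, min(end, D)))': mark every element of the range
def markRange (cov : Array Bool) (a b : Int) : Array Bool :=
  (PySem.List.pyRange a b 1).foldl (fun c x => c.setIfInBounds x.toNat true) cov

-- starts = [i*S for i in range(n)]; coverage = set(); for start in starts: coverage.update(range(start, min(start+P, D))).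
-- Python's 'coverage' set only ever holds ints in [0, D) (every start is ≥ 0 and the ranges
-- are clipped at D) and is consumed only through len(); it is ported as a Boolean array over
-- [0, D) — exact for the membership and the size this code uses.
def patchCoverage (D P S n : Int) : Array Bool :=
  ((PySem.List.pyRange 0 n 1).map (fun i => i * S)).foldl
    (fun cov start => markRange cov start (min (start + P) D))
    (Array.replicate D.toNat false)

-- len(coverage)
def coverageLen (cov : Array Bool) : Int := (cov.toList.count true : Int)

-- the 'while True' loop; fuel D.toNat + 2 is enough for every input A terminates on
def patchLoop (D P : Int) : Nat → Int → Int × Int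
  | 0, n => (stridePatchS D P n, n)   -- fuel exhausted: unreachable under Pre_
  | fuel + 1, n =>
    let S := stridePatchS D P n
    if (n - 1) * S + P ≥ D ∧ coverageLen (patchCoverage D P S n) ≥ D then (S, n)
    else patchLoop D P fuel (n + 1)

def compute_stride_and_n_patches (D : Int) (P : Int) (extra_patch_num : Int) : List Int :=
  let r := patchLoop D P (D.toNat + 2) 1
  let n := r.2 + extra_patch_num
  let S := if n > 1 then max (pyCeilDiv (D - P) (n - 1)) 1 else r.1
  [S, n]

-- ===== PORT B =====
def compute_stride_and_n_patches_alt (D : Int) (P : Int) (extra_patch_num : Int) : List Int :=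
  let n : Int := (if P ≥ D then 1 else max 2 (-(PySem.Int.floordiv D (-P)))) + extra_patch_num
  let S : Int := if n ≤ 1 then 1 else max (-(PySem.Int.floordiv (P - D) (n - 1))) 1
  [S, n]

-- ===== PRECONDITION & SPEC =====
-- Pre_ excludes exactly the inputs where A never returns: for D ≥ 1 and P ≤ 0 the patches
-- cover nothing, the coverage test never succeeds and A's 'while True' loop diverges.
def Pre_compute_stride_and_n_patches (D : Int) (P : Int) (extra_patch_num : Int) : Prop :=
  D ≤ 0 ∨ 1 ≤ P
instance (D : Int) (P : Int) (extra_patch_num : Int) : Decidable (Pre_compute_stride_and_n_patches D P extra_patch_num) := by unfold Pre_compute_stride_and_n_patches; infer_instance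

def pvWitness_compute_stride_and_n_patches : Int × Int × Int := (10, 3, 1)

-- When a negative extra_patch_num drops the adjusted patch count to 1 or below although
-- more than one patch was needed and the minimal stride exceeds 1, A returns the leftover
-- stride of its search loop while B returns stride 1 — the intended
-- value for a degenerate single-patch count, consistent with A's own single-patch case.
def D_compute_stride_and_n_patches (D : Int) (P : Int) (extra_patch_num : Int) : Prop :=
  P < D ∧ extra_patch_num ≤ -1 ∧ D - P ≥ 2 ∧
    (P ≤ 0 ∨ (D ≤ (1 - extra_patch_num) * P ∧ D ≤ (D - P) * P))
instance (D : Int) (P : Int) (extra_patch_num : Int) : Decidable (D_compute_stride_and_n_patches D P extra_patch_num) := by unfold D_compute_stride_and_n_patches; infer_instance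

def Spec_compute_stride_and_n_patches (D : Int) (P : Int) (extra_patch_num : Int) (out : List Int) : Prop := ¬ D_compute_stride_and_n_patches D P extra_patch_num → out = compute_stride_and_n_patches_alt D P extra_patch_num
instance (D : Int) (P : Int) (extra_patch_num : Int) (out : List Int) : Decidable (Spec_compute_stride_and_n_patches D P extra_patch_num out) := by unfold Spec_compute_stride_and_n_patches; infer_instance

def pvDiffWitness_compute_stride_and_n_patches : Int × Int × Int := (5, 2, -3)
def pvDiffWitnessOut_compute_stride_and_n_patches : (List Int) × (List Int) := ([2, 0], [1, 0])

-- ===== CLAIM (what is proved, stated in full; the proofs are below) =====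
def Claim_unchanged_compute_stride_and_n_patches : Prop := ∀ (D : Int) (P : Int) (extra_patch_num : Int), Dom_compute_stride_and_n_patches D P extra_patch_num → Pre_compute_stride_and_n_patches D P extra_patch_num → Spec_compute_stride_and_n_patches D P extra_patch_num (compute_stride_and_n_patches D P extra_patch_num)
def Claim_changed_compute_stride_and_n_patches : Prop := Dom_compute_stride_and_n_patches (pvDiffWitness_compute_stride_and_n_patches.1) (pvDiffWitness_compute_stride_and_n_patches.2.1) (pvDiffWitness_compute_stride_and_n_patches.2.2) ∧ Pre_compute_stride_and_n_patches (pvDiffWitness_compute_stride_and_n_patches.1) (pvDiffWitness_compute_stride_and_n_patches.2.1) (pvDiffWitness_compute_stride_and_n_patches.2.2) ∧ D_compute_stride_and_n_patches (pvDiffWitness_compute_stride_and_n_patches.1) (pvDiffWitness_compute_stride_and_n_patches.2.1) (pvDiffWitness_compute_stride_and_n_patches.2.2) ∧ compute_stride_and_n_patches (pvDiffWitness_compute_stride_and_n_patches.1) (pvDiffWitness_compute_stride_and_n_patches.2.1) (pvDiffWitness_compute_stride_and_n_patches.2.2) = pvDiffWitnessOut_compute_stride_and_n_patches.1 ∧ compute_stride_and_n_patches_alt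 (pvDiffWitness_compute_stride_and_n_patches.1) (pvDiffWitness_compute_stride_and_n_patches.2.1) (pvDiffWitness_compute_stride_and_n_patches.2.2) = pvDiffWitnessOut_compute_stride_and_n_patches.2 ∧ pvDiffWitnessOut_compute_stride_and_n_patches.1 ≠ pvDiffWitnessOut_compute_stride_and_n_patches.2
def Claim_exact_compute_stride_and_n_patches : Prop := ∀ (D : Int) (P : Int) (extra_patch_num : Int), Dom_compute_stride_and_n_patches D P extra_patch_num → Pre_compute_stride_and_n_patches D P extra_patch_num → D_compute_stride_and_n_patches D P extra_patch_num → compute_stride_and_n_patches D P extra_patch_num ≠ compute_stride_and_n_patches_alt D P extra_patch_num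

-- ===== LEMMAS AND PROOFS =====

-- A's minimal patch count, as the search loop finds it
def nMin (D P : Int) : Int :=
  if P ≥ D then 1 else if D ≤ 0 then 2 else pyCeilDiv D P

theorem pyCeilDiv_brackets (a : Int) {b : Int} (hb : 0 < b) :
    (pyCeilDiv a b - 1) * b < a ∧ a ≤ pyCeilDiv a b * b :=
  (PySem.Int.neg_floordiv_neg_eq_iff_of_pos hb).mp rfl

-- B's '-(D // -P)' is the ceiling division ceil(D/P)
theorem ceilAlt_eq (D P : Int) : -(PySem.Int.floordiv D (-P)) = pyCeilDiv D P := by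
  unfold pyCeilDiv
  rw [show PySem.Int.floordiv D (-P) = PySem.Int.floordiv (-D) P from by
    simpa using PySem.Int.floordiv_neg_neg (-D) P]

theorem nMin_ge_two {D P : Int} (hD : 0 < D) (hP : 0 < P) (hPD : P < D) : 2 ≤ pyCeilDiv D P := by
  have hb := pyCeilDiv_brackets D hP
  nlinarith [hb.2]

-- B's closed-form count agrees with A's loop count on Pre_
theorem minPatches_eq {D P : Int} (hpre : D ≤ 0 ∨ 1 ≤ P) :
    (if P ≥ D then (1:Int) else max 2 (-(PySem.Int.floordiv D (-P)))) = nMin D P := by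
  unfold nMin
  by_cases hge : P ≥ D
  · rw [if_pos hge, if_pos hge]
  · rw [if_neg hge]
    by_cases hD : D ≤ 0
    · rw [if_neg hge, if_pos hD]
      have hP : P < 0 := by omega
      have hid : -(PySem.Int.floordiv D (-P)) = pyCeilDiv (-D) (-P) := by
        unfold pyCeilDiv; rw [neg_neg]
      have h := pyCeilDiv_brackets (-D) (show (0:Int) < -P by omega)
      rw [← hid] at h
      have hc : -PySem.Int.floordiv D (-P) ≤ 2 := by
        nlinarith [h.1, show -D < -P by omega, show (0:Int) < -P by omega]
      omega
    · rw [ceilAlt_eq, if_neg hge, if_neg hD]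
      have hP : 1 ≤ P := by rcases hpre with h | h <;> omega
      have := nMin_ge_two (show (0:Int) < D by omega) (show (0:Int) < P by omega) (by omega)
      omega

theorem nMin_brackets {D P : Int} (hD : 0 < D) (hP : 0 < P) (hPD : P < D) :
    (nMin D P - 1) * P < D ∧ D ≤ nMin D P * P := by
  unfold nMin
  rw [if_neg (by omega), if_neg (by omega)]
  exact pyCeilDiv_brackets D hP

theorem size_foldl_mark (l : List Int) :
    ∀ cov : Array Bool, (l.foldl (fun c x => c.setIfInBounds x.toNat true) cov).size = cov.size := by
  induction l with
  | nil => intro cov; rfl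
  | cons x xs ih =>
    intro cov
    rw [List.foldl_cons, ih]
    exact Array.size_setIfInBounds

theorem getElem?_foldl_mark (l : List Int) (hl : ∀ x ∈ l, 0 ≤ x) (k : Nat) :
    ∀ cov : Array Bool,
      ((l.foldl (fun c x => c.setIfInBounds x.toNat true) cov)[k]? = some true ↔
        cov[k]? = some true ∨ ((k : Int) ∈ l ∧ k < cov.size)) := by
  induction l with
  | nil => intro cov; simp
  | cons x xs ih =>
    intro cov
    rw [List.foldl_cons, ih (fun y hy => hl y (List.mem_cons_of_mem x hy))]
    have hx0 : 0 ≤ x := hl x List.mem_cons_self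
    rw [Array.size_setIfInBounds, Array.getElem?_setIfInBounds]
    by_cases hk : k < cov.size
    · rw [Array.getElem?_eq_getElem hk]
      by_cases hxk : x.toNat = k
      · have hxk' : x = (k : Int) := by omega
        simp only [if_pos hxk, if_pos (show x.toNat < cov.size from hxk ▸ hk),
          List.mem_cons]
        constructor
        · intro _; exact Or.inr ⟨Or.inl hxk'.symm, hk⟩
        · intro _; exact Or.inl trivial
      · have hxk' : ¬ ((k : Int) = x) := by omega
        simp only [if_neg hxk, List.mem_cons]
        tauto
    · have h1 : cov[k]? = none := Array.getElem?_eq_none (by omega)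
      have h2 : ¬ ((if x.toNat = k then if x.toNat < cov.size then some true else none
          else cov[k]?) = some true) := by
        by_cases hxk : x.toNat = k
        · rw [if_pos hxk, if_neg (by omega)]; simp
        · rw [if_neg hxk, h1]; simp
      constructor
      · rintro (h | ⟨_, hlt⟩)
        · exact absurd h h2
        · omega
      · rintro (h | ⟨_, hlt⟩)
        · rw [h1] at h; exact absurd h (by simp)
        · omega

theorem size_markRange (cov : Array Bool) (a b : Int) : (markRange cov a b).size = cov.size :=
  size_foldl_mark _ cov

theorem getElem?_markRange (cov : Array Bool) {a : Int} (b : Int) (ha : 0 ≤ a) (k : Nat) :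
    ((markRange cov a b)[k]? = some true ↔
      cov[k]? = some true ∨ (a ≤ (k : Int) ∧ (k : Int) < b ∧ k < cov.size)) := by
  unfold markRange
  rw [getElem?_foldl_mark _
    (fun x hx => le_trans ha (PySem.List.mem_pyRange_one.mp hx).1) k cov]
  rw [PySem.List.mem_pyRange_one]
  tauto

theorem size_foldl_cover (D P : Int) (l : List Int) :
    ∀ cov : Array Bool,
      (l.foldl (fun cov start => markRange cov start (min (start + P) D)) cov).size
        = cov.size := by
  induction l with
  | nil => intro cov; rfl
  | cons x xs ih =>
    intro cov
    rw [List.foldl_cons, ih]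
    exact size_markRange _ _ _

theorem getElem?_foldl_cover (D P : Int) (k : Nat) (l : List Int) (hl : ∀ s ∈ l, 0 ≤ s) :
    ∀ cov : Array Bool,
      ((l.foldl (fun cov start => markRange cov start (min (start + P) D)) cov)[k]?
          = some true ↔
        cov[k]? = some true ∨
          ∃ s ∈ l, s ≤ (k : Int) ∧ (k : Int) < min (s + P) D ∧ k < cov.size) := by
  induction l with
  | nil => intro cov; simp
  | cons x xs ih =>
    intro cov
    rw [List.foldl_cons, ih (fun y hy => hl y (List.mem_cons_of_mem x hy))]
    rw [size_markRange, getElem?_markRange cov (min (x + P) D) (hl x List.mem_cons_self) k]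
    simp only [List.mem_cons]
    constructor
    · rintro ((h | h) | ⟨s, hs, h⟩)
      · exact Or.inl h
      · exact Or.inr ⟨x, Or.inl rfl, h.1, h.2.1, h.2.2⟩
      · exact Or.inr ⟨s, Or.inr hs, h⟩
    · rintro (h | ⟨s, (rfl | hs), h⟩)
      · exact Or.inl (Or.inl h)
      · exact Or.inl (Or.inr h)
      · exact Or.inr ⟨s, hs, h⟩

theorem size_patchCoverage (D P S n : Int) : (patchCoverage D P S n).size = D.toNat := by
  unfold patchCoverage
  rw [size_foldl_cover, Array.size_replicate]

theorem covered_iff {D P S n : Int} (hS : 1 ≤ S) (k : Nat) :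
    ((patchCoverage D P S n)[k]? = some true) ↔
      ∃ i : Int, 0 ≤ i ∧ i < n ∧ i * S ≤ (k : Int) ∧ (k : Int) < min (i * S + P) D := by
  unfold patchCoverage
  rw [getElem?_foldl_cover D P k ((PySem.List.pyRange 0 n 1).map (fun i => i * S))
    (by
      rintro s hs
      obtain ⟨i, hi, rfl⟩ := List.mem_map.mp hs
      exact mul_nonneg (PySem.List.mem_pyRange_one.mp hi).1 (by omega))
    (Array.replicate D.toNat false)]
  simp only [Array.getElem?_replicate, Array.size_replicate, List.mem_map]
  constructor
  · rintro (h | ⟨s, ⟨i, hi, rfl⟩, h1, h2, h3⟩)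
    · split at h <;> simp_all
    · rw [PySem.List.mem_pyRange_one] at hi
      exact ⟨i, hi.1, hi.2, h1, h2⟩
  · rintro ⟨i, h0, h1, h2, h3⟩
    refine Or.inr ⟨i * S, ⟨i, PySem.List.mem_pyRange_one.mpr ⟨h0, h1⟩, rfl⟩, h2, h3, ?_⟩
    have h4 : 0 ≤ i * S := mul_nonneg h0 (by omega)
    omega

theorem len_patchCoverage_of_covers {D P S n : Int} (hS : 1 ≤ S) (hSP : S ≤ P)
    (hn : 1 ≤ n) (hlast : D ≤ (n - 1) * S + P) :
    coverageLen (patchCoverage D P S n) = max D 0 := by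
  have hmem : ∀ x : Int, 0 ≤ x → x < D →
      ∃ i : Int, 0 ≤ i ∧ i < n ∧ i * S ≤ x ∧ x < min (i * S + P) D := by
    intro x hx0 hxD
    have hSpos : (0:Int) < S := by omega
    have hj0 : 0 ≤ x / S := Int.ediv_nonneg hx0 (by omega)
    have hjle : S * (x / S) ≤ x := by
      have := Int.emod_nonneg x (show S ≠ 0 by omega)
      have := Int.mul_ediv_add_emod x S
      omega
    have hjlt : x < S * (x / S) + S := by
      have := Int.emod_lt_of_pos x hSpos
      have := Int.mul_ediv_add_emod x S
      omega
    by_cases hcase : x / S ≤ n - 1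
    · refine ⟨x / S, hj0, by omega, by linarith [hjle], ?_⟩
      have : x < x / S * S + P := by nlinarith
      omega
    · refine ⟨n - 1, by omega, by omega, ?_, ?_⟩
      · calc (n - 1) * S ≤ (x / S) * S := by
              apply mul_le_mul_of_nonneg_right (by omega) (by omega)
          _ ≤ x := by linarith [hjle]
      · omega
  have hall : ∀ j : Nat, (hj : j < (patchCoverage D P S n).size) →
      (patchCoverage D P S n)[j] = true := by
    intro j hj
    have hjD : (j : Int) < D := by
      have := size_patchCoverage D P S n
      omega
    have := (covered_iff (D := D) (P := P) (n := n) hS j).mpr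
      (hmem (j : Int) (by omega) hjD)
    rw [Array.getElem?_eq_getElem hj] at this
    exact Option.some_injective _ this
  show ((patchCoverage D P S n).toList.count true : Int) = max D 0
  have hcnt : (patchCoverage D P S n).toList.count true
      = (patchCoverage D P S n).toList.length := by
    rw [List.count_eq_length]
    intro b hb
    obtain ⟨j, hj, hbj⟩ := List.mem_iff_getElem.mp hb
    rw [Array.getElem_toList (by omega)] at hbj
    rw [← hbj, hall j (by simpa [Array.length_toList] using hj)]
  rw [hcnt, Array.length_toList, size_patchCoverage]
  omega

theorem len_patchCoverage_of_hole {D P S n : Int} (hP : 1 ≤ P) (hPS : P < S) (hPD : P < D) :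
    coverageLen (patchCoverage D P S n) < D := by
  have hS : 1 ≤ S := by omega
  have hsz := size_patchCoverage D P S n
  have hkD : P.toNat < (patchCoverage D P S n).size := by omega
  have hfalse : (patchCoverage D P S n)[P.toNat] = false := by
    by_contra h
    have h' : (patchCoverage D P S n)[P.toNat]? = some true := by
      rw [Array.getElem?_eq_getElem hkD]
      simpa using h
    obtain ⟨i, h0, h1, h2, h3⟩ := (covered_iff hS P.toNat).mp h'
    have hcast : ((P.toNat : Nat) : Int) = P := by omega
    rw [hcast] at h2 h3
    rcases lt_or_ge i 1 with hi | hi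
    · have : i = 0 := by omega
      subst this; rw [zero_mul] at h3; omega
    · have : S ≤ i * S := le_mul_of_one_le_left (by omega) hi
      omega
  have hmem : false ∈ (patchCoverage D P S n).toList := by
    have := List.getElem_mem (l := (patchCoverage D P S n).toList) (n := P.toNat)
      (by rw [Array.length_toList]; exact hkD)
    rw [Array.getElem_toList hkD, hfalse] at this
    exact this
  have hne : (patchCoverage D P S n).toList.count true
      ≠ (patchCoverage D P S n).toList.length := by
    intro h
    have := (List.count_eq_length.mp h) false hmem
    simp at this
  have hle := List.count_le_length (a := true) (l := (patchCoverage D P S n).toList)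
  show ((patchCoverage D P S n).toList.count true : Int) < D
  have : (patchCoverage D P S n).toList.length = D.toNat := by
    rw [Array.length_toList, hsz]
  omega

theorem len_patchCoverage_nonneg (D P S n : Int) :
    0 ≤ coverageLen (patchCoverage D P S n) := Int.natCast_nonneg _

theorem nMin_ge_two' {D P : Int} (hD : 0 < D) (hP : 0 < P) (hPD : P < D) : 2 ≤ nMin D P := by
  unfold nMin
  rw [if_neg (by omega), if_neg (by omega)]
  exact nMin_ge_two hD hP hPD

theorem cond_iff {D P : Int} (hpre : D ≤ 0 ∨ 1 ≤ P) {n : Int} (hn : 1 ≤ n) :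
    ((n - 1) * stridePatchS D P n + P ≥ D ∧
      coverageLen (patchCoverage D P (stridePatchS D P n) n) ≥ D) ↔ nMin D P ≤ n := by
  rcases eq_or_lt_of_le hn with hn1 | hn2
  · -- n = 1
    have hn1 : n = 1 := hn1.symm
    subst hn1
    have hS : stridePatchS D P 1 = 1 := by unfold stridePatchS; simp
    rw [hS]
    constructor
    · rintro ⟨hlast, _⟩
      have hPD : P ≥ D := by omega
      unfold nMin
      rw [if_pos hPD]
    · intro hle
      have hPD : P ≥ D := by
        by_contra hPD
        rcases hpre with h | h
        · unfold nMin at hle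
          rw [if_neg hPD, if_pos h] at hle; omega
        · have := nMin_ge_two' (D := D) (P := P) (by omega) (by omega) (by omega)
          omega
      refine ⟨by omega, ?_⟩
      rcases le_or_gt D 0 with hD | hD
      · exact le_trans hD (len_patchCoverage_nonneg _ _ _ _)
      · have := len_patchCoverage_of_covers (D := D) (P := P) (n := 1) (S := 1) le_rfl
          (by omega) le_rfl (by omega)
        omega
  · -- n ≥ 2
    have hn2' : 2 ≤ n := hn2
    set c := pyCeilDiv (D - P) (n - 1) with hc
    have hS : stridePatchS D P n = max c 1 := by
      unfold stridePatchS; rw [if_neg (by omega)]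
    have hbr := pyCeilDiv_brackets (D - P) (show (0:Int) < n - 1 by omega)
    rw [← hc] at hbr
    have hS1 : 1 ≤ max c 1 := by omega
    have hlast : D ≤ (n - 1) * max c 1 + P := by
      have h1 : c * (n - 1) ≤ max c 1 * (n - 1) :=
        mul_le_mul_of_nonneg_right (by omega) (by omega)
      nlinarith [hbr.2]
    rw [hS]
    rcases le_or_gt D 0 with hD | hD
    · -- D ≤ 0: condition always true, nMin ≤ 2 ≤ n
      constructor
      · intro _
        unfold nMin
        split_ifs <;> omega
      · intro _
        exact ⟨by omega, le_trans hD (len_patchCoverage_nonneg _ _ _ _)⟩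
    · have hP : 1 ≤ P := by omega
      rcases le_or_gt D P with hPD | hPD
      · -- P ≥ D: stride is 1, coverage complete, nMin = 1
        have hcle : c ≤ 1 := by nlinarith [hbr.1]
        have hlen := len_patchCoverage_of_covers (D := D) (n := n) (S := max c 1)
          hS1 (by omega) (by omega) hlast
        have hge : P ≥ D := by omega
        constructor
        · intro _; unfold nMin; rw [if_pos hge]; omega
        · intro _; exact ⟨hlast, by omega⟩
      · -- 1 ≤ P < D: condition ⟺ stride ≤ P ⟺ n ≥ ceil(D/P)
        have hq := nMin_brackets hD (by omega) hPD
        have hq2 := nMin_ge_two' hD (by omega) hPD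
        constructor
        · rintro ⟨_, hlen⟩
          by_contra hlt
          push Not at hlt
          -- n ≤ nMin - 1 forces stride > P, hence a hole
          have hcgt : P < c := by
            have h1 : (n - 1) * P < D - P := by nlinarith [hq.1]
            nlinarith [hbr.2]
          have := len_patchCoverage_of_hole (D := D) (S := max c 1) (n := n) hP (by omega) hPD
          omega
        · intro hge
          have hcle : c ≤ P := by
            by_contra hgt
            push Not at hgt
            have h1 : P * (n - 1) ≤ (c - 1) * (n - 1) :=
              mul_le_mul_of_nonneg_right (by omega) (by omega)
            nlinarith [hbr.1, hq.2]
          have hlen := len_patchCoverage_of_covers (D := D) (n := n) (S := max c 1)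
            hS1 (by omega) (by omega) hlast
          exact ⟨hlast, by omega⟩

theorem patchLoop_eq {D P : Int} (hpre : D ≤ 0 ∨ 1 ≤ P) :
    ∀ (fuel : Nat) (n : Int), 1 ≤ n → n ≤ nMin D P → nMin D P - n < fuel →
      patchLoop D P fuel n = (stridePatchS D P (nMin D P), nMin D P) := by
  intro fuel
  induction fuel with
  | zero => intro n _ _ h; omega
  | succ f ih =>
    intro n hn hle hfuel
    show (if (n - 1) * stridePatchS D P n + P ≥ D ∧
            coverageLen (patchCoverage D P (stridePatchS D P n) n) ≥ D
          then (stridePatchS D P n, n) else patchLoop D P f (n + 1)) = _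
    by_cases hc : nMin D P ≤ n
    · rw [if_pos ((cond_iff hpre hn).mpr hc)]
      have : n = nMin D P := le_antisymm hle hc
      rw [this]
    · rw [if_neg (fun h => hc ((cond_iff hpre hn).mp h))]
      exact ih (n + 1) (by omega) (by omega) (by omega)

theorem nMin_le_bound {D P : Int} (hpre : D ≤ 0 ∨ 1 ≤ P) : nMin D P ≤ max D 0 + 2 := by
  rcases le_or_gt D 0 with hD | hD
  · unfold nMin; split_ifs <;> omega
  · rcases le_or_gt D P with hPD | hPD
    · unfold nMin; rw [if_pos (show P ≥ D from hPD)]; omega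
    · have hP : 1 ≤ P := by rcases hpre with h | h <;> omega
      have hb := nMin_brackets hD (by omega) hPD
      have h2 := nMin_ge_two' hD (by omega) hPD
      nlinarith [hb.1, le_max_left D 0,
        mul_nonneg (show (0:Int) ≤ nMin D P - 1 by omega) (show (0:Int) ≤ P - 1 by omega)]

theorem nMin_ge_one {D P : Int} (hpre : D ≤ 0 ∨ 1 ≤ P) : 1 ≤ nMin D P := by
  rcases le_or_gt D 0 with hD | hD
  · unfold nMin; split_ifs <;> omega
  · rcases le_or_gt D P with hPD | hPD
    · unfold nMin; rw [if_pos (show P ≥ D from hPD)]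
    · have := nMin_ge_two' hD (by rcases hpre with h | h <;> omega) hPD
      omega

theorem ceil_le_iff {D P : Int} (hP : 0 < P) {k : Int} :
    pyCeilDiv D P ≤ k ↔ D ≤ k * P := by
  have h := pyCeilDiv_brackets D hP
  constructor
  · intro hk; nlinarith [h.2]
  · intro hk; nlinarith [h.1]

theorem nMin_ge_two_of_lt {D P : Int} (hpre : D ≤ 0 ∨ 1 ≤ P) (hPD : P < D) :
    2 ≤ nMin D P := by
  by_cases hD : D ≤ 0
  · unfold nMin; rw [if_neg (by omega), if_pos hD]
  · exact nMin_ge_two' (by omega) (by rcases hpre with h | h <;> omega) hPD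

-- the change region, characterised through A's loop count
theorem D_iff {D P : Int} (hpre : D ≤ 0 ∨ 1 ≤ P) (e : Int) :
    D_compute_stride_and_n_patches D P e ↔
      (P < D ∧ nMin D P + e ≤ 1 ∧ D - P > nMin D P - 1) := by
  unfold D_compute_stride_and_n_patches
  by_cases hPD : P < D
  · simp only [hPD, true_and]
    by_cases hP : P ≤ 0
    · have hD : D ≤ 0 := by rcases hpre with h | h <;> omega
      have hn : nMin D P = 2 := by unfold nMin; rw [if_neg (by omega), if_pos hD]
      rw [hn]
      constructor
      · rintro ⟨h1, h2, _⟩; omega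
      · rintro ⟨h1, h2⟩; exact ⟨by omega, by omega, Or.inl hP⟩
    · have hD : 0 < D := by omega
      have hn : nMin D P = pyCeilDiv D P := by
        unfold nMin; rw [if_neg (by omega), if_neg (by omega)]
      have hge2 := nMin_ge_two hD (by omega) hPD
      rw [hn]
      constructor
      · rintro ⟨he, hdp, hor⟩
        rcases hor with h | ⟨ha, hb⟩
        · omega
        · have h1 := (ceil_le_iff (show (0:Int) < P by omega)).mpr ha
          have h2 := (ceil_le_iff (show (0:Int) < P by omega)).mpr hb
          omega
      · rintro ⟨h1, h2⟩
        have ha := (ceil_le_iff (show (0:Int) < P by omega)).mp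
          (show pyCeilDiv D P ≤ 1 - e by omega)
        have hb := (ceil_le_iff (show (0:Int) < P by omega)).mp
          (show pyCeilDiv D P ≤ D - P by omega)
        exact ⟨by omega, by omega, Or.inr ⟨ha, hb⟩⟩
  · simp [hPD]

-- A's value on Pre_: the loop lands exactly at nMin
theorem portA_eq {D P : Int} (hpre : D ≤ 0 ∨ 1 ≤ P) (e : Int) :
    compute_stride_and_n_patches D P e =
      [if nMin D P + e > 1 then max (pyCeilDiv (D - P) (nMin D P + e - 1)) 1
        else stridePatchS D P (nMin D P), nMin D P + e] := by
  unfold compute_stride_and_n_patches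
  rw [patchLoop_eq hpre (D.toNat + 2) 1 le_rfl (nMin_ge_one hpre)
    (by have := nMin_le_bound hpre; omega)]

-- ===== VERDICT (by name: the statement is the Claim_ definition above) =====
theorem compute_stride_and_n_patches_spec : Claim_unchanged_compute_stride_and_n_patches := by
  intro D P e _ hpre
  unfold Spec_compute_stride_and_n_patches
  intro hnd
  have hpre' : D ≤ 0 ∨ 1 ≤ P := hpre
  rw [portA_eq hpre' e]
  unfold compute_stride_and_n_patches_alt
  show [if nMin D P + e > 1 then max (pyCeilDiv (D - P) (nMin D P + e - 1)) 1
          else stridePatchS D P (nMin D P), nMin D P + e]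
      = [(if ((if P ≥ D then (1:Int) else max 2 (-(PySem.Int.floordiv D (-P)))) + e) ≤ 1 then 1
          else max (-(PySem.Int.floordiv (P - D)
            ((if P ≥ D then (1:Int) else max 2 (-(PySem.Int.floordiv D (-P)))) + e - 1))) 1),
         (if P ≥ D then (1:Int) else max 2 (-(PySem.Int.floordiv D (-P)))) + e]
  rw [minPatches_eq hpre']
  have hceil : ∀ m : Int, -(PySem.Int.floordiv (P - D) m) = pyCeilDiv (D - P) m := by
    intro m; unfold pyCeilDiv; rw [neg_sub]
  congr 1
  by_cases hgt : nMin D P + e > 1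
  · rw [if_pos hgt, if_neg (by omega), hceil]
  · rw [if_neg hgt, if_pos (by omega)]
    by_cases hPD : P ≥ D
    · unfold stridePatchS
      rw [show nMin D P = 1 from by unfold nMin; rw [if_pos hPD], if_pos rfl]
    · have hge2 : 2 ≤ nMin D P := nMin_ge_two_of_lt hpre' (by omega)
      have hnd' : D - P ≤ nMin D P - 1 := by
        rw [D_iff hpre' e] at hnd
        push Not at hnd
        have h1 := hnd (by omega) (by omega)
        omega
      unfold stridePatchS
      rw [if_neg (by omega)]
      have hbr := pyCeilDiv_brackets (D - P) (show (0:Int) < nMin D P - 1 by omega)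
      have hle1 : pyCeilDiv (D - P) (nMin D P - 1) ≤ 1 := by nlinarith [hbr.1]
      omega

theorem compute_stride_and_n_patches_changed : Claim_changed_compute_stride_and_n_patches := by
  unfold Claim_changed_compute_stride_and_n_patches; decide

theorem compute_stride_and_n_patches_tight : Claim_exact_compute_stride_and_n_patches := by
  intro D P e _ hpre hd
  have hpre' : D ≤ 0 ∨ 1 ≤ P := hpre
  rw [D_iff hpre' e] at hd
  obtain ⟨hPD, hle, hbig⟩ := hd
  have hge2 : 2 ≤ nMin D P := nMin_ge_two_of_lt hpre' hPD
  rw [portA_eq hpre' e]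
  unfold compute_stride_and_n_patches_alt
  show [if nMin D P + e > 1 then max (pyCeilDiv (D - P) (nMin D P + e - 1)) 1
          else stridePatchS D P (nMin D P), nMin D P + e]
      ≠ [(if ((if P ≥ D then (1:Int) else max 2 (-(PySem.Int.floordiv D (-P)))) + e) ≤ 1 then 1
          else max (-(PySem.Int.floordiv (P - D)
            ((if P ≥ D then (1:Int) else max 2 (-(PySem.Int.floordiv D (-P)))) + e - 1))) 1),
         (if P ≥ D then (1:Int) else max 2 (-(PySem.Int.floordiv D (-P)))) + e]
  rw [minPatches_eq hpre']
  rw [if_neg (show ¬ (nMin D P + e > 1) by omega), if_pos (by omega)]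
  intro hcontra
  have hheads := List.head_eq_of_cons_eq hcontra
  unfold stridePatchS at hheads
  rw [if_neg (by omega)] at hheads
  have hbr := pyCeilDiv_brackets (D - P) (show (0:Int) < nMin D P - 1 by omega)
  have hge : 2 ≤ pyCeilDiv (D - P) (nMin D P - 1) := by nlinarith [hbr.2]
  omega
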